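-- pv_equiv track=rewrite | github.com/RepDuel/RepDuel | backend/scripts/update_scenario_muscles.py | normalise_muscles
-- ===== SOURCE A (Python) =====
-- from typing import Iterable, List, Sequence
--
-- ALLOWED_MUSCLES = {
--     "abs",
--     "biceps",
--     "calves",
--     "chest",
--     "forearms",
--     "glutes",
--     "hamstrings",
--     "lats",
--     "lower back",
--     "quads",
--     "shoulders",
--     "traps",
--     "triceps",
-- }
--
-- def normalise_muscles(muscles: Iterable[str]) -> List[str]:
--     seen = set()
--     cleaned: List[str] = []
--     for name in muscles:
--         candidate = name.strip().lower()
--         if not candidate or candidate in seen or candidate not in ALLOWED_MUSCLES: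
--             continue
--         seen.add(candidate)
--         cleaned.append(candidate)
--     return cleaned
-- ===== SOURCE B (Python) =====
-- ALLOWED_MUSCLES = {
--     "abs",
--     "biceps",
--     "calves",
--     "chest",
--     "forearms",
--     "glutes",
--     "hamstrings",
--     "lats",
--     "lower back",
--     "quads",
--     "shoulders",
--     "traps",
--     "triceps",
-- }
--
--
-- def normalise_muscles(muscles):
--     # Walk the input back-to-front; when an allowed name appears, prepend it and
--     # drop the later duplicate already in the accumulator.  The first (earliest)
--     # occurrence is processed last, so it ends up in front of the others and
--     # evicts any later copy: first-occurrence order, no seen-set needed.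
--     cleaned = []
--     for name in reversed(list(muscles)):
--         candidate = name.strip().lower()
--         if candidate in ALLOWED_MUSCLES:
--             cleaned = [candidate] + [x for x in cleaned if x != candidate]
--     return cleaned
-- ===== Notes on version B (the rewrite author's own statement) =====
-- stated objective: alternative
-- what changed: B traverses the input in reverse with no seen-set: each allowed normalized name is prepended to the accumulator while evicting its later duplicate from it, so first occurrences win by overwriting instead of being guarded by a membership test.
import Mathlib
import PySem

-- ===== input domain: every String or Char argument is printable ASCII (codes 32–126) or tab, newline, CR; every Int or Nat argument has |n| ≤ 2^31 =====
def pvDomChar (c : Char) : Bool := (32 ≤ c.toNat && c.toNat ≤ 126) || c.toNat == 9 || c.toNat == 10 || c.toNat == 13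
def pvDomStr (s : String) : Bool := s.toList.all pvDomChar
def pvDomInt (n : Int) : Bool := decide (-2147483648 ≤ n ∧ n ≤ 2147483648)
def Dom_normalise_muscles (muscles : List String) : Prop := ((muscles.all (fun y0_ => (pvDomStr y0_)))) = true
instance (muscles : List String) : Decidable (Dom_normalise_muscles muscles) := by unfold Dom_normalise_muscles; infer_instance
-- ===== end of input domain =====

-- B walks the input in REVERSE with no seen-set: each allowed normalized name is
-- prepended while evicting its later duplicate from the accumulator (alternative decomposition).
-- shared module-level constant ALLOWED_MUSCLES
def allowedMuscles : PySem.Set String := PySem.Set.ofList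
  ["abs", "biceps", "calves", "chest", "forearms", "glutes", "hamstrings",
   "lats", "lower back", "quads", "shoulders", "traps", "triceps"]

-- ===== PORT A =====
def normAStep (st : PySem.Set String × List String) (name : String) :
    PySem.Set String × List String :=
  let candidate := PySem.Str.lower (PySem.Str.strip name)
  if candidate == "" || PySem.Set.contains st.1 candidate ||
      !(PySem.Set.contains allowedMuscles candidate) then st
  else (PySem.Set.add st.1 candidate, st.2 ++ [candidate])

def normalise_muscles (muscles : List String) : List String :=
  (muscles.foldl normAStep (PySem.Set.empty, [])).2

-- ===== PORT B =====
-- B: for name in reversed(muscles): if norm(name) in ALLOWED: cleaned = [c] + [x for x in cleaned if x != c]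
def normBStep (cleaned : List String) (name : String) : List String :=
  let candidate := PySem.Str.lower (PySem.Str.strip name)
  if PySem.Set.contains allowedMuscles candidate then
    candidate :: cleaned.filter (fun x => x != candidate)
  else cleaned

def normalise_muscles_alt (muscles : List String) : List String :=
  muscles.reverse.foldl normBStep []

-- ===== PRECONDITION & SPEC =====
def Spec_normalise_muscles (muscles : List String) (out : List String) : Prop := out = normalise_muscles_alt muscles
instance (muscles : List String) (out : List String) : Decidable (Spec_normalise_muscles muscles out) := by unfold Spec_normalise_muscles; infer_instance

-- ===== CLAIM (what is proved, stated in full; the proofs are below) =====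
def Claim_equal_normalise_muscles : Prop := ∀ (muscles : List String), Dom_normalise_muscles muscles → Spec_normalise_muscles muscles (normalise_muscles muscles)

-- ===== LEMMAS AND PROOFS =====

-- the allowed-membership predicate, shared by both characterisations
def allowedP (m : String) : Bool := PySem.Set.contains allowedMuscles m

lemma contains_eq_decide_mem (s : List String) (x : String) :
    PySem.Set.contains s x = decide (x ∈ s) := by
  simp [PySem.Set.contains]

-- first-occurrence dedup, as a front recursion: keep the head, erase it from the rest
def fdd : List String → List String
  | [] => []
  | c :: cs => c :: (fdd cs).filter (fun x => x != c)

-- fdd commutes with filtering by an element-wise predicate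
lemma fdd_filter (p : String → Bool) :
    ∀ l : List String, (fdd l).filter p = fdd (l.filter p) := by
  intro l
  induction l with
  | nil => simp [fdd]
  | cons c cs ih =>
    by_cases hc : p c = true
    · rw [show fdd (c :: cs) = c :: (fdd cs).filter (fun x => x != c) from rfl,
        List.filter_cons_of_pos hc, List.filter_cons_of_pos hc,
        show fdd (c :: cs.filter p) = c :: (fdd (cs.filter p)).filter (fun x => x != c) from rfl]
      congr 1
      rw [List.filter_filter, ← ih, List.filter_filter]
      exact List.filter_congr (fun a _ => Bool.and_comm _ _)
    · have hc' : p c = false := by simpa using hc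
      rw [show fdd (c :: cs) = c :: (fdd cs).filter (fun x => x != c) from rfl,
        List.filter_cons_of_neg hc, List.filter_cons_of_neg hc,
        List.filter_filter, ← ih]
      exact List.filter_congr (fun a _ => by
        cases h : p a
        · simp [h]
        · have hac : a ≠ c := fun e => by subst e; rw [hc'] at h; simp at h
          simp [h, hac])

-- A's seen-set fold computes first-occurrence dedup
lemma foldl_add_eq_fdd : ∀ (cs : List String) (s : List String),
    cs.foldl PySem.Set.add s = s ++ (fdd cs).filter (fun x => !(decide (x ∈ s))) := by
  intro cs
  induction cs with
  | nil => intro s; simp [fdd]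
  | cons c cs ih =>
    intro s
    simp only [List.foldl_cons]
    by_cases hs : c ∈ s
    · have hadd : PySem.Set.add s c = s := by
        simp [PySem.Set.add, contains_eq_decide_mem, hs]
      rw [hadd, ih s]
      congr 1
      rw [show fdd (c :: cs) = c :: (fdd cs).filter (fun x => x != c) from rfl,
        List.filter_cons_of_neg (by simp [hs]), List.filter_filter]
      exact List.filter_congr (fun a _ => by
        cases h : decide (a ∈ s)
        · have hac : a ≠ c := fun e => by subst e; simp [hs] at h
          simp [h, hac]
        · simp [h])
    · have hadd : PySem.Set.add s c = s ++ [c] := by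
        simp [PySem.Set.add, contains_eq_decide_mem, hs]
      rw [hadd, ih (s ++ [c])]
      rw [show fdd (c :: cs) = c :: (fdd cs).filter (fun x => x != c) from rfl,
        List.filter_cons_of_pos (by simp [hs]), List.filter_filter,
        List.append_assoc, List.singleton_append]
      congr 2
      exact List.filter_congr (fun a _ => by
        by_cases hac : a = c
        · subst hac; simp
        · simp [List.mem_append, hac])

-- loop invariant for A: the cleaned list is the allowed-filtered seen set
lemma loop_eq (cs : List String) : ∀ (s : List String),
    (cs.foldl (fun st c =>
        if c == "" || PySem.Set.contains st.1 c || !(PySem.Set.contains allowedMuscles c)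
        then st else (PySem.Set.add st.1 c, st.2 ++ [c]))
        (s.filter allowedP, s.filter allowedP)).2
      = (cs.foldl PySem.Set.add s).filter allowedP := by
  induction cs with
  | nil => intro s; simp
  | cons c cs ih =>
    intro s
    simp only [List.foldl_cons]
    by_cases hP : allowedP c
    · have hne : (c == "") = false := by
        rcases (by decide : "" ∉ allowedMuscles ∨ False) with h | h
        · simp only [beq_eq_false_iff_ne, ne_eq]
          rintro rfl
          simp [allowedP, contains_eq_decide_mem] at hP
          exact h hP
        · exact h.elim
      by_cases hs : c ∈ s
      · have hmemF : c ∈ s.filter allowedP := List.mem_filter.2 ⟨hs, hP⟩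
        have : PySem.Set.contains (s.filter allowedP) c = true := by
          rw [contains_eq_decide_mem]; simpa using hmemF
        rw [hne, this]
        simp only [Bool.false_or, Bool.true_or, if_true]
        have : PySem.Set.add s c = s := by simp [PySem.Set.add, contains_eq_decide_mem, hs]
        rw [this]
        exact ih s
      · have hnF : c ∉ s.filter allowedP := fun h => hs (List.mem_filter.1 h).1
        have hc1 : PySem.Set.contains (s.filter allowedP) c = false := by
          rw [contains_eq_decide_mem]; simpa using hnF
        rw [hne, hc1]
        have hPmem : c ∈ allowedMuscles := by
          have := hP
          simp only [allowedP, contains_eq_decide_mem] at this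
          simpa using this
        simp only [allowedP] at hP
        rw [hP]
        simp only [Bool.false_or, Bool.not_true, Bool.or_false, if_false]
        have hadd : PySem.Set.add s c = s ++ [c] := by
          simp [PySem.Set.add, contains_eq_decide_mem, hs]
        have haddF : PySem.Set.add (s.filter allowedP) c = s.filter allowedP ++ [c] := by
          simp only [PySem.Set.add, hc1]
          simp
        have hfil : (s ++ [c]).filter allowedP = s.filter allowedP ++ [c] := by
          have hPb : allowedP c = true := by
            simp [allowedP, contains_eq_decide_mem, hPmem]
          simp [List.filter_append, hPb]
        rw [hadd, haddF, ← hfil]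
        exact ih (s ++ [c])
    · have hP' : allowedP c = false := by simpa using hP
      have hnm : c ∉ allowedMuscles := by
        simp only [allowedP, contains_eq_decide_mem] at hP'
        simpa using hP'
      have hskip : (c == "" || PySem.Set.contains ((s.filter allowedP) : PySem.Set String) c ||
          !(PySem.Set.contains allowedMuscles c)) = true := by
        simp [contains_eq_decide_mem, hnm]
      rw [hskip]
      simp only [if_true]
      have hfil : (PySem.Set.add s c).filter allowedP = s.filter allowedP := by
        by_cases hs : c ∈ s
        · have : PySem.Set.add s c = s := by simp [PySem.Set.add, contains_eq_decide_mem, hs]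
          rw [this]
        · have : PySem.Set.add s c = s ++ [c] := by
            simp [PySem.Set.add, contains_eq_decide_mem, hs]
          rw [this]
          simp [List.filter_append, hP']
      rw [← hfil]
      exact ih (PySem.Set.add s c)

lemma step_as_lambda (muscles : List String) :
    normalise_muscles muscles =
      ((muscles.map (fun name => PySem.Str.lower (PySem.Str.strip name))).foldl
        (fun st c =>
          if c == "" || PySem.Set.contains st.1 c || !(PySem.Set.contains allowedMuscles c)
          then st else (PySem.Set.add st.1 c, st.2 ++ [c]))
        (PySem.Set.empty, [])).2 := by
  unfold normalise_muscles
  rw [List.foldl_map]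
  rfl

-- B's reverse fold is the foldr of its step over the normalized names
lemma alt_as_foldr (muscles : List String) :
    normalise_muscles_alt muscles =
      (muscles.map (fun name => PySem.Str.lower (PySem.Str.strip name))).foldr
        (fun c acc => if allowedP c then c :: acc.filter (fun x => x != c) else acc) [] := by
  unfold normalise_muscles_alt
  rw [List.foldl_reverse, List.foldr_map]
  rfl

-- B computes first-occurrence dedup of the allowed normalized names
lemma foldr_eq_fdd_filter : ∀ (cs : List String),
    cs.foldr (fun c acc => if allowedP c then c :: acc.filter (fun x => x != c) else acc) []
      = fdd (cs.filter allowedP) := by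
  intro cs
  induction cs with
  | nil => simp [fdd]
  | cons c cs ih =>
    simp only [List.foldr_cons, List.filter_cons, ih]
    by_cases hc : allowedP c = true
    · simp [hc, fdd]
    · have hc' : allowedP c = false := by simpa using hc
      simp [hc']

-- ===== VERDICT (by name: the statement is the Claim_ definition above) =====
theorem normalise_muscles_spec : Claim_equal_normalise_muscles := by
  intro muscles _
  unfold Spec_normalise_muscles
  rw [step_as_lambda, alt_as_foldr, foldr_eq_fdd_filter]
  have h := loop_eq (muscles.map (fun name => PySem.Str.lower (PySem.Str.strip name))) []
  simp only [List.filter_nil] at h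
  rw [show (PySem.Set.empty : PySem.Set String) = ([] : List String) from rfl, h,
    foldl_add_eq_fdd, List.nil_append]
  rw [show (fun x => !(decide (x ∈ ([] : List String)))) = (fun _ : String => true) by
    funext x; simp]
  rw [List.filter_true, fdd_filter]
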